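-- pv_equiv track=rewrite | github.com/sebkeil/KR-Project01-Group02 | final_working_version/simplification.py | unit_clauses
-- ===== SOURCE A (Python) =====
-- def unit_clauses(clauses, assigns, validity_check):
--     varbs = []
--
--     for literals in clauses:
--         if len(literals) == 1:
--             item = literals[0]
--             varbs.append(item)
--
--     for items in varbs:
--         if -items in varbs or -items in assigns:
--             validity_check = False
--
--     return validity_check
-- ===== SOURCE B (Python) =====
-- def unit_clauses(clauses, assigns, validity_check):
--     seen = set()
--     assign_set = set(assigns)
--     for clause in clauses:
--         if len(clause) == 1:
--             lit = clause[0]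
--             seen.add(lit)
--             if -lit in seen or -lit in assign_set:
--                 validity_check = False
--     return validity_check
-- ===== Notes on version B (the rewrite author's own statement) =====
-- stated objective: alternative
-- what changed: Fuses A's two passes (collect all unit literals, then rescan the whole unit-literal list for each one) into a single loop that maintains a set of unit literals seen so far and checks each new literal's complement against that set and a prebuilt set of assigns.
import Mathlib
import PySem

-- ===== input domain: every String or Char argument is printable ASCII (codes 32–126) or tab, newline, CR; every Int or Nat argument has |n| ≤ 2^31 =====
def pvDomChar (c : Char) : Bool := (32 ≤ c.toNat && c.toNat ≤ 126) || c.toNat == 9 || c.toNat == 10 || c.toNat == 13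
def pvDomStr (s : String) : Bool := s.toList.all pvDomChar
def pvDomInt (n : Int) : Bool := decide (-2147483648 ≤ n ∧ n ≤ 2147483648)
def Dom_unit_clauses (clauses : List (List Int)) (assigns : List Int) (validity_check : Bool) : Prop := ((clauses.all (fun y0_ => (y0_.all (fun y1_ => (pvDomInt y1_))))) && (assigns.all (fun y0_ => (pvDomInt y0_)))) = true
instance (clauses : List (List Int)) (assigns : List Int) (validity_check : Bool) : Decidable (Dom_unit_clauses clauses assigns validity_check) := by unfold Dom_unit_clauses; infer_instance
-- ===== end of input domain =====

-- B fuses A's two passes into one loop over the clauses maintaining a set of unit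
-- literals seen so far (checked against a prebuilt set of assigns), instead of A's
-- collect-then-rescan of the whole unit-literal list for every unit literal.


-- ===== PORT A =====
def unit_clauses (clauses : List (List Int)) (assigns : List Int) (validity_check : Bool) : Bool :=
  let varbs := clauses.foldl (fun varbs literals =>
    if literals.length = 1 then
      match PySem.List.pyGet? literals 0 with
      | some item => varbs ++ [item]
      | none => varbs          -- unreachable: length = 1
    else varbs) []
  varbs.foldl (fun validity_check items =>
    if (-items) ∈ varbs ∨ (-items) ∈ assigns then false else validity_check) validity_check

-- ===== PORT B =====
def unit_clauses_alt (clauses : List (List Int)) (assigns : List Int) (validity_check : Bool) : Bool :=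
  let assign_set : PySem.Set Int := PySem.Set.ofList assigns
  (clauses.foldl (fun (st : PySem.Set Int × Bool) clause =>
    if clause.length = 1 then
      match PySem.List.pyGet? clause 0 with
      | some lit =>
        let seen := PySem.Set.add st.1 lit
        (seen, if (-lit) ∈ seen ∨ (-lit) ∈ assign_set then false else st.2)
      | none => st             -- unreachable: length = 1
    else st) (PySem.Set.empty, validity_check)).2

-- ===== PRECONDITION & SPEC =====
def Spec_unit_clauses (clauses : List (List Int)) (assigns : List Int) (validity_check : Bool) (out : Bool) : Prop := out = unit_clauses_alt clauses assigns validity_check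
instance (clauses : List (List Int)) (assigns : List Int) (validity_check : Bool) (out : Bool) : Decidable (Spec_unit_clauses clauses assigns validity_check out) := by unfold Spec_unit_clauses; infer_instance

-- ===== CLAIM (what is proved, stated in full; the proofs are below) =====
def Claim_equal_unit_clauses : Prop := ∀ (clauses : List (List Int)) (assigns : List Int) (validity_check : Bool), Dom_unit_clauses clauses assigns validity_check → Spec_unit_clauses clauses assigns validity_check (unit_clauses clauses assigns validity_check)

-- ===== LEMMAS AND PROOFS =====

/-- The unit literals of a clause list, in order. -/
def unitsOf (cs : List (List Int)) : List Int :=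
  cs.filterMap (fun c => match c with | [x] => some x | _ => none)

theorem unitsOf_nil_cons (cs : List (List Int)) : unitsOf ([] :: cs) = unitsOf cs := rfl

theorem unitsOf_single (x : Int) (cs : List (List Int)) : unitsOf ([x] :: cs) = x :: unitsOf cs := rfl

theorem unitsOf_long (x y : Int) (t : List Int) (cs : List (List Int)) :
    unitsOf ((x :: y :: t) :: cs) = unitsOf cs := rfl

theorem pyGet?_single (x : Int) : PySem.List.pyGet? [x] 0 = some x := by
  simp [PySem.List.pyGet?, PySem.List.pyIdx?]

/-- A's first loop builds exactly `unitsOf`. -/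
theorem A_collect (cs : List (List Int)) (acc : List Int) :
    cs.foldl (fun varbs literals =>
      if literals.length = 1 then
        match PySem.List.pyGet? literals 0 with
        | some item => varbs ++ [item]
        | none => varbs
      else varbs) acc = acc ++ unitsOf cs := by
  induction cs generalizing acc with
  | nil => simp [unitsOf]
  | cons c cs ih =>
    cases c with
    | nil => simpa [unitsOf_nil_cons] using ih acc
    | cons x t =>
      cases t with
      | nil =>
        simp only [List.foldl_cons, List.length_cons, List.length_nil]
        simp only [if_true]
        rw [pyGet?_single]
        simpa [unitsOf_single] using ih (acc ++ [x])
      | cons y t' =>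
        simp only [List.foldl_cons, List.length_cons]
        rw [if_neg (by simp)]
        simpa [unitsOf_long] using ih acc

/-- A's second loop is `b && !(any offending literal)`. -/
theorem A_scan (V assigns : List Int) (L : List Int) (b : Bool) :
    L.foldl (fun vc items =>
      if (-items) ∈ V ∨ (-items) ∈ assigns then false else vc) b
      = (b && !decide (∃ l ∈ L, -l ∈ V ∨ -l ∈ assigns)) := by
  induction L generalizing b with
  | nil => simp
  | cons x L ih =>
    simp only [List.foldl_cons]
    by_cases h : (-x) ∈ V ∨ (-x) ∈ assigns
    · rw [if_pos h, ih]
      simp [h]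
    · rw [if_neg h, ih]
      simp [h]

/-- Invariant for B's fused loop: `seen` has the same members as `u`, and the final
flag is the initial flag conjoined with "no unit literal of `cs` has its complement
among `u ++ unitsOf cs` or among the assigns". -/
theorem B_loop (assigns : List Int) (cs : List (List Int))
    (seen : PySem.Set Int) (u : List Int) (b : Bool)
    (hmem : ∀ x : Int, x ∈ seen ↔ x ∈ u) :
    (cs.foldl (fun (st : PySem.Set Int × Bool) clause =>
      if clause.length = 1 then
        match PySem.List.pyGet? clause 0 with
        | some lit =>
          let seen := PySem.Set.add st.1 lit
          (seen, if (-lit) ∈ seen ∨ (-lit) ∈ PySem.Set.ofList assigns then false else st.2)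
        | none => st
      else st) (seen, b)).2
      = (b && !decide (∃ l ∈ unitsOf cs, -l ∈ u ++ unitsOf cs ∨ -l ∈ assigns)) := by
  induction cs generalizing seen u b with
  | nil => simp [unitsOf]
  | cons c cs ih =>
    cases c with
    | nil =>
      simp only [List.foldl_cons, List.length_nil]
      rw [if_neg (by simp)]
      rw [ih seen u b hmem, unitsOf_nil_cons]
    | cons x t =>
      cases t with
      | nil =>
        simp only [List.foldl_cons, List.length_cons, List.length_nil]
        simp only [if_true]
        rw [pyGet?_single]
        simp only []
        have hmem' : ∀ y : Int, y ∈ PySem.Set.add seen x ↔ y ∈ u ++ [x] := by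
          intro y
          rw [PySem.Set.mem_add]
          simp [hmem y]
        rw [ih (PySem.Set.add seen x) (u ++ [x]) _ hmem']
        have hc : ((-x) ∈ PySem.Set.add seen x ∨ (-x) ∈ PySem.Set.ofList assigns)
            ↔ ((-x) ∈ u ++ [x] ∨ (-x) ∈ assigns) := by
          rw [hmem' (-x), PySem.Set.mem_ofList]
        -- rewrite the accumulated lists: (u ++ [x]) ++ unitsOf cs = u ++ x :: unitsOf cs
        have hl : (u ++ [x]) ++ unitsOf cs = u ++ x :: unitsOf cs := by simp
        rw [unitsOf_single]
        simp only [hl]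
        -- propositional core: step condition ∨ rest ↔ full condition over x :: unitsOf cs
        have key : (((-x) ∈ u ++ [x] ∨ (-x) ∈ assigns)
              ∨ ∃ l ∈ unitsOf cs, -l ∈ u ++ x :: unitsOf cs ∨ -l ∈ assigns)
            ↔ (∃ l ∈ x :: unitsOf cs, -l ∈ u ++ x :: unitsOf cs ∨ -l ∈ assigns) := by
          constructor
          · rintro (h | ⟨l, hl', hp⟩)
            · refine ⟨x, List.mem_cons_self .., ?_⟩
              rcases h with h | h
              · left
                rcases List.mem_append.1 h with h | h
                · exact List.mem_append.2 (Or.inl h)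
                · exact List.mem_append.2 (Or.inr (List.mem_cons.2 (Or.inl (List.mem_singleton.1 h))))
              · exact Or.inr h
            · exact ⟨l, List.mem_cons_of_mem _ hl', hp⟩
          · rintro ⟨l, hl', hp⟩
            rcases List.mem_cons.1 hl' with rfl | hl'
            · rcases hp with hp | hp
              · rcases List.mem_append.1 hp with hp | hp
                · exact Or.inl (Or.inl (List.mem_append.2 (Or.inl hp)))
                · rcases List.mem_cons.1 hp with hp | hp
                  · exact Or.inl (Or.inl (List.mem_append.2 (Or.inr (List.mem_singleton.2 hp))))
                  · -- -l is itself a later unit literal; use it as the witness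
                    refine Or.inr ⟨-l, hp, Or.inl ?_⟩
                    rw [neg_neg]
                    exact List.mem_append.2 (Or.inr (List.mem_cons_self ..))
              · exact Or.inl (Or.inr hp)
            · exact Or.inr ⟨l, hl', hp⟩
        by_cases hstep : ((-x) ∈ PySem.Set.add seen x ∨ (-x) ∈ PySem.Set.ofList assigns)
        · rw [if_pos hstep]
          have hE : (∃ l ∈ x :: unitsOf cs, -l ∈ u ++ x :: unitsOf cs ∨ -l ∈ assigns) :=
            key.1 (Or.inl (hc.1 hstep))
          simp only [decide_eq_true hE, Bool.not_true, Bool.and_false]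
          exact Bool.false_and _
        · rw [if_neg hstep]
          have hx : ¬ ((-x) ∈ u ++ [x] ∨ (-x) ∈ assigns) := fun h => hstep (hc.2 h)
          congr 1
          have e12 := (or_iff_right hx).symm.trans key
          simp only [e12]
      | cons y t' =>
        simp only [List.foldl_cons, List.length_cons]
        rw [if_neg (by simp)]
        rw [ih seen u b hmem, unitsOf_long]

theorem A_eq (clauses : List (List Int)) (assigns : List Int) (b : Bool) :
    unit_clauses clauses assigns b
      = (b && !decide (∃ l ∈ unitsOf clauses, -l ∈ unitsOf clauses ∨ -l ∈ assigns)) := by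
  unfold unit_clauses
  rw [A_collect clauses []]
  simp only [List.nil_append]
  exact A_scan _ _ _ _

theorem B_eq (clauses : List (List Int)) (assigns : List Int) (b : Bool) :
    unit_clauses_alt clauses assigns b
      = (b && !decide (∃ l ∈ unitsOf clauses, -l ∈ unitsOf clauses ∨ -l ∈ assigns)) := by
  unfold unit_clauses_alt
  have := B_loop assigns clauses PySem.Set.empty [] b (by intro x; simp [PySem.Set.empty])
  simp only [List.nil_append] at this
  exact this

-- ===== VERDICT (by name: the statement is the Claim_ definition above) =====
theorem unit_clauses_spec : Claim_equal_unit_clauses := by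
  intro clauses assigns validity_check _
  unfold Spec_unit_clauses
  rw [A_eq, B_eq]
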